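-- pv_equiv track=rewrite | github.com/aducktyping/algorithms | programming_assignment_2/programming_assignment_2_1.py | qs_comps_pivot_a_0
-- ===== SOURCE A (Python) =====
-- def partition(a):
--     i = 1
--     for j in range(1, len(a)):
--         if a[j] > a[0]: continue
--         else:
--             a[i], a[j] = a[j], a[i]
--             i += 1
--     a[0], a[i-1] = a[i-1], a[0]
--
--     return a, i
--
-- def qs_comps_pivot_a_0(a):
--     n = len(a)
--     if n <= 1:
--         return a, 0
--
--     a, i = partition(a)
--
--     a[0:i-1], comps_l = qs_comps_pivot_a_0(a[0:i-1])
--     a[i:], comps_r = qs_comps_pivot_a_0(a[i:])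
--
--     return a, comps_l + comps_r + (n - 1)
-- ===== SOURCE B (Python) =====
-- # Iterative in-place quicksort: an explicit work-list of (lo, hi) index ranges
-- # replaces A's recursion over list slices; one running comparison counter.
-- def qs_comps_pivot_a_0(a):
--     comps = 0
--     stack = [(0, len(a))]
--     while stack:
--         lo, hi = stack.pop()
--         if hi - lo < 2:
--             continue
--         pivot = a[lo]
--         i = lo + 1
--         for j in range(lo + 1, hi):
--             if a[j] <= pivot:
--                 a[i], a[j] = a[j], a[i]
--                 i += 1
--         a[lo], a[i - 1] = a[i - 1], a[lo]
--         comps += hi - lo - 1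
--         stack.append((i, hi))
--         stack.append((lo, i - 1))
--     return a, comps
-- ===== Notes on version B (the rewrite author's own statement) =====
-- stated objective: alternative
-- what changed: Replaces A's recursion over freshly sliced sublists (with slice-assignment write-backs) by an iterative quicksort that drives an explicit work-list of (lo, hi) index ranges and partitions the one list in place with a single running comparison counter.
import Mathlib
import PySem

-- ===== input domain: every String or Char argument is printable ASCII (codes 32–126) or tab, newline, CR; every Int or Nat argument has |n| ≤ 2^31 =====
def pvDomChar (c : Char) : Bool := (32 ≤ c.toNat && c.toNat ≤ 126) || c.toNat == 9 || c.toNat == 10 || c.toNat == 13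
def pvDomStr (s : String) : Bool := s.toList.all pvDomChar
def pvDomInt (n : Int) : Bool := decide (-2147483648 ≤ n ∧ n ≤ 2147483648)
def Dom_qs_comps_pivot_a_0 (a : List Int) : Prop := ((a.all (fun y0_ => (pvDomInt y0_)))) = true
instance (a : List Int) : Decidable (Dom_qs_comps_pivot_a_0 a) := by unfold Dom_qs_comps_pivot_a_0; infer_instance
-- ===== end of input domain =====

-- B replaces A's recursion over list slices by an iterative quicksort driving an
-- explicit work-list of (lo, hi) index ranges, sorting in place with a running
-- counter (objective: alternative, same cost). Both Pythons mutate and return the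
-- argument list itself; the equivalence proved here is about the RETURN value.

-- ===== PORT A =====
-- a[i], a[j] = a[j], a[i]  (indices are in range throughout, so Nat indices are exact)
def pvSwapA (a : List Int) (i j : Nat) : List Int :=
  (a.set i (a.getD j 0)).set j (a.getD i 0)

-- the 'for j in range(1, len(a))' loop of partition, state (a, i)
def partLoopA : List Int → Nat → List Nat → List Int × Nat
  | a, i, [] => (a, i)
  | a, i, j :: js =>
    if a.getD j 0 > a.getD 0 0 then partLoopA a i js
    else partLoopA (pvSwapA a i j) (i + 1) js

-- lemmas the port needs for termination (cited in decreasing_by)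
theorem partLoopA_length : ∀ (a : List Int) (i : Nat) (js : List Nat),
    (partLoopA a i js).1.length = a.length := by
  intro a i js
  induction js generalizing a i with
  | nil => rfl
  | cons j js ih =>
    simp only [partLoopA]
    split
    · exact ih a i
    · simpa [pvSwapA] using ih (pvSwapA a i j) (i + 1)

theorem partLoopA_ge : ∀ (a : List Int) (i : Nat) (js : List Nat),
    i ≤ (partLoopA a i js).2 := by
  intro a i js
  induction js generalizing a i with
  | nil => exact le_rfl
  | cons j js ih =>
    simp only [partLoopA]
    split
    · exact ih a i
    · exact le_trans (Nat.le_succ i) (ih _ (i + 1))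

theorem partLoopA_le : ∀ (a : List Int) (i : Nat) (js : List Nat),
    (partLoopA a i js).2 ≤ i + js.length := by
  intro a i js
  induction js generalizing a i with
  | nil => simp [partLoopA]
  | cons j js ih =>
    simp only [partLoopA]
    split
    · exact le_trans (ih a i) (by simp)
    · exact le_trans (ih _ (i + 1)) (by simp; omega)

def partitionA (a : List Int) : List Int × Nat :=
  let p := partLoopA a 1 (List.range' 1 (a.length - 1))
  (pvSwapA p.1 0 (p.2 - 1), p.2)

def qs_comps_pivot_a_0 (a : List Int) : List Int × Int :=
  if a.length ≤ 1 then (a, 0)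
  else
    let p := partitionA a
    let l := qs_comps_pivot_a_0 (p.1.take (p.2 - 1))
    let r := qs_comps_pivot_a_0 (p.1.drop p.2)
    (l.1 ++ p.1.getD (p.2 - 1) 0 :: r.1, l.2 + r.2 + ((a.length : Int) - 1))
termination_by a.length
decreasing_by
  · have h1 := partLoopA_length a 1 (List.range' 1 (a.length - 1))
    have h2 := partLoopA_ge a 1 (List.range' 1 (a.length - 1))
    have h3 := partLoopA_le a 1 (List.range' 1 (a.length - 1))
    simp [partitionA, pvSwapA, List.length_range'] at *
    try omega
  · have h1 := partLoopA_length a 1 (List.range' 1 (a.length - 1))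
    have h2 := partLoopA_ge a 1 (List.range' 1 (a.length - 1))
    simp [partitionA, pvSwapA] at *
    omega

-- ===== PORT B =====
-- the 'for j in range(lo+1, hi)' loop of one in-place partition, state (a, i)
def partLoopI : List Int → Int → Nat → List Nat → List Int × Nat
  | a, _, i, [] => (a, i)
  | a, p, i, j :: js =>
    if a.getD j 0 ≤ p then partLoopI (pvSwapA a i j) p (i + 1) js
    else partLoopI a p i js

theorem partLoopI_ge : ∀ (a : List Int) (p : Int) (i : Nat) (js : List Nat),
    i ≤ (partLoopI a p i js).2 := by
  intro a p i js
  induction js generalizing a i with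
  | nil => exact le_rfl
  | cons j js ih =>
    simp only [partLoopI]
    split
    · exact le_trans (Nat.le_succ i) (ih _ (i + 1))
    · exact ih a i

theorem partLoopI_le : ∀ (a : List Int) (p : Int) (i : Nat) (js : List Nat),
    (partLoopI a p i js).2 ≤ i + js.length := by
  intro a p i js
  induction js generalizing a i with
  | nil => simp [partLoopI]
  | cons j js ih =>
    simp only [partLoopI]
    split
    · exact le_trans (ih _ (i + 1)) (by simp; omega)
    · exact le_trans (ih a i) (by simp)

-- one partition of the range [lo, hi) of a, pivot a[lo]; returns (a, i)
def partRange (a : List Int) (lo hi : Nat) : List Int × Nat :=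
  let piv := a.getD lo 0
  let q := partLoopI a piv (lo + 1) (List.range' (lo + 1) (hi - lo - 1))
  (pvSwapA q.1 lo (q.2 - 1), q.2)

theorem partRange_ge (a : List Int) (lo hi : Nat) : lo + 1 ≤ (partRange a lo hi).2 := by
  simpa [partRange] using partLoopI_ge a (a.getD lo 0) (lo + 1) _

theorem partRange_le (a : List Int) (lo hi : Nat) :
    (partRange a lo hi).2 ≤ lo + 1 + (hi - lo - 1) := by
  simpa [partRange, List.length_range'] using
    partLoopI_le a (a.getD lo 0) (lo + 1) (List.range' (lo + 1) (hi - lo - 1))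

def rangeSum : List (Nat × Nat) → Nat
  | [] => 0
  | (lo, hi) :: s => (hi - lo) + rangeSum s

-- the 'while stack' loop, state (a, comps, stack); top of stack = head
def stackLoop : List Int → Int → List (Nat × Nat) → List Int × Int
  | a, c, [] => (a, c)
  | a, c, (lo, hi) :: s =>
    if hi - lo < 2 then stackLoop a c s
    else
      let q := partRange a lo hi
      stackLoop q.1 (c + ((hi : Int) - (lo : Int) - 1)) ((lo, q.2 - 1) :: (q.2, hi) :: s)
termination_by a c s => 2 * rangeSum s + s.length
decreasing_by
  · simp [rangeSum]; omega
  · have h1 := partRange_ge a lo hi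
    have h2 := partRange_le a lo hi
    simp [rangeSum] at *
    omega

def qs_comps_pivot_a_0_alt (a : List Int) : List Int × Int :=
  stackLoop a 0 [(0, a.length)]

-- ===== PRECONDITION & SPEC =====
def Spec_qs_comps_pivot_a_0 (a : List Int) (out : List Int × Int) : Prop := out = qs_comps_pivot_a_0_alt a
instance (a : List Int) (out : List Int × Int) : Decidable (Spec_qs_comps_pivot_a_0 a out) := by unfold Spec_qs_comps_pivot_a_0; infer_instance

-- ===== CLAIM =====
def Claim_equal_qs_comps_pivot_a_0 : Prop := ∀ (a : List Int), Dom_qs_comps_pivot_a_0 a → Spec_qs_comps_pivot_a_0 a (qs_comps_pivot_a_0 a)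

-- ===== LEMMAS AND PROOFS =====

theorem getD_append_length (l : List Int) (x : Int) (r : List Int) :
    (l ++ x :: r).getD l.length 0 = x := by
  induction l with
  | nil => rfl
  | cons y l ih => simpa using ih

theorem set_append_length (l : List Int) (x y : Int) (r : List Int) :
    (l ++ y :: r).set l.length x = l ++ x :: r := by
  induction l with
  | nil => rfl
  | cons z l ih => simpa using ih

theorem set_getD_self (a : List Int) (i : Nat) (h : i < a.length) :
    a.set i (a.getD i 0) = a := by
  induction a generalizing i with
  | nil => rfl
  | cons x a ih =>
    cases i with
    | zero => rfl
    | succ i => simpa using ih i (by simpa using h)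

theorem pvSwapA_id (a : List Int) (i : Nat) (h : i < a.length) :
    pvSwapA a i i = a := by
  unfold pvSwapA
  rw [set_getD_self a i h, set_getD_self a i h]

theorem pvSwapA_cons (y : Int) (a : List Int) (i j : Nat) :
    pvSwapA (y :: a) (i + 1) (j + 1) = y :: pvSwapA a i j := by
  simp [pvSwapA]

theorem pvSwapA_split (pre : List Int) (g : Int) (gs : List Int) (x : Int) (rest : List Int) :
    pvSwapA (pre ++ g :: (gs ++ x :: rest)) pre.length (pre.length + (gs.length + 1))
      = pre ++ x :: (gs ++ g :: rest) := by
  induction pre with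
  | nil =>
    simp only [List.nil_append, List.length_nil, Nat.zero_add]
    have hj : (g :: (gs ++ x :: rest)).getD (gs.length + 1) 0 = x := by
      simpa using getD_append_length gs x rest
    have hset : (g :: (gs ++ x :: rest)).set 0 x = x :: (gs ++ x :: rest) := rfl
    simp [pvSwapA, hj, hset, set_append_length]
  | cons y pre ih =>
    have h2 : pre.length + 1 + (gs.length + 1) = (pre.length + (gs.length + 1)) + 1 := by
      omega
    simp only [List.length_cons, List.cons_append]
    rw [h2, pvSwapA_cons, ih]

-- proof-side accumulator partition: characterizes both partition loops
def accLoop : Int → List Int → List Int → List Int → List Int × List Int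
  | _, les, gts, [] => (les, gts)
  | p, les, gts, x :: xs =>
    if x ≤ p then
      accLoop p (les ++ [x]) (if gts.isEmpty then gts else gts.drop 1 ++ [gts.headD 0]) xs
    else accLoop p les (gts ++ [x]) xs

theorem accLoop_len : ∀ (rest : List Int) (p : Int) (les gts : List Int),
    (accLoop p les gts rest).1.length + (accLoop p les gts rest).2.length
      = les.length + gts.length + rest.length := by
  intro rest
  induction rest with
  | nil => intro p les gts; simp [accLoop]
  | cons x xs ih =>
    intro p les gts
    simp only [accLoop]
    split
    · rcases gts with _ | ⟨g, gs⟩ <;> simp [ih] <;> omega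
    · simp [ih]; omega

-- A's index loop over p :: les ++ gts ++ rest at i = |les|+1, scanning from index
-- |les|+|gts|+1, computes the accumulator loop
theorem loop_corr : ∀ (rest les gts : List Int) (p : Int),
    partLoopA (p :: (les ++ gts ++ rest)) (les.length + 1)
        (List.range' (les.length + gts.length + 1) rest.length)
      = (p :: ((accLoop p les gts rest).1 ++ (accLoop p les gts rest).2),
         (accLoop p les gts rest).1.length + 1) := by
  intro rest
  induction rest with
  | nil => intro les gts p; simp [partLoopA, accLoop]
  | cons x rest ih =>
    intro les gts p
    have hx : (p :: (les ++ gts ++ x :: rest)).getD (les.length + gts.length + 1) 0 = x := by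
      have h0 := getD_append_length (les ++ gts) x rest
      simp only [List.append_assoc, List.length_append] at h0
      simpa using h0
    simp only [List.length_cons, List.range'_succ, partLoopA, hx, List.getD_cons_zero]
    by_cases hc : x ≤ p
    · rw [if_neg (not_lt.mpr hc)]
      simp only [accLoop, if_pos hc]
      rcases gts with _ | ⟨g, gs⟩
      · simp only [List.length_nil, Nat.add_zero, List.nil_append]
        rw [pvSwapA_id _ _ (by simp)]
        have h1 := ih (les ++ [x]) [] p
        simpa [Nat.add_assoc, Nat.add_comm, Nat.add_left_comm] using h1
      · have hidx : les.length + (g :: gs).length + 1 = (p :: les).length + (gs.length + 1) := by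
          simp; omega
        have hsh : p :: (les ++ (g :: gs) ++ x :: rest) = (p :: les) ++ g :: (gs ++ x :: rest) := by
          simp
        rw [hidx, hsh, show les.length + 1 = (p :: les).length from rfl, pvSwapA_split]
        have h1 := ih (les ++ [x]) (gs ++ [g]) p
        simpa [Nat.add_assoc, Nat.add_comm, Nat.add_left_comm] using h1
    · rw [if_pos (not_le.mp hc)]
      simp only [accLoop, if_neg hc]
      have h1 := ih les (gts ++ [x]) p
      simpa [Nat.add_assoc, Nat.add_comm, Nat.add_left_comm] using h1

-- B's index loop, embedded in context PRE … SUF, computes the same accumulator loop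
theorem loop_corrI : ∀ (rest les gts : List Int) (p : Int) (PRE SUF : List Int),
    partLoopI (PRE ++ p :: (les ++ gts ++ (rest ++ SUF))) p
        (PRE.length + les.length + 1)
        (List.range' (PRE.length + les.length + gts.length + 1) rest.length)
      = (PRE ++ p :: ((accLoop p les gts rest).1 ++ ((accLoop p les gts rest).2 ++ SUF)),
         PRE.length + (accLoop p les gts rest).1.length + 1) := by
  intro rest
  induction rest with
  | nil => intro les gts p PRE SUF; simp [partLoopI, accLoop]
  | cons x rest ih =>
    intro les gts p PRE SUF
    have hx : (PRE ++ p :: (les ++ gts ++ (x :: rest ++ SUF))).getD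
        (PRE.length + les.length + gts.length + 1) 0 = x := by
      have hsh : PRE ++ p :: (les ++ gts ++ (x :: rest ++ SUF))
          = (PRE ++ p :: (les ++ gts)) ++ x :: (rest ++ SUF) := by simp
      have hl : PRE.length + les.length + gts.length + 1
          = (PRE ++ p :: (les ++ gts)).length := by simp; omega
      rw [hsh, hl]
      exact getD_append_length _ x _
    simp only [List.length_cons, List.range'_succ, partLoopI, hx]
    by_cases hc : x ≤ p
    · rw [if_pos hc]
      simp only [accLoop, if_pos hc]
      rcases gts with _ | ⟨g, gs⟩
      · simp only [List.length_nil, Nat.add_zero, List.nil_append]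
        rw [pvSwapA_id _ _ (by simp; omega)]
        have h1 := ih (les ++ [x]) [] p PRE SUF
        simpa [Nat.add_assoc, Nat.add_comm, Nat.add_left_comm] using h1
      · have hidx : PRE.length + les.length + (g :: gs).length + 1
            = (PRE ++ p :: les).length + (gs.length + 1) := by
          simp; omega
        have hsh : PRE ++ p :: (les ++ (g :: gs) ++ (x :: rest ++ SUF))
            = (PRE ++ p :: les) ++ g :: (gs ++ x :: (rest ++ SUF)) := by
          simp
        have hi0 : PRE.length + les.length + 1 = (PRE ++ p :: les).length := by simp; omega
        rw [hidx, hsh, hi0, pvSwapA_split]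
        have h1 := ih (les ++ [x]) (gs ++ [g]) p PRE SUF
        simpa [Nat.add_assoc, Nat.add_comm, Nat.add_left_comm] using h1
    · rw [if_neg hc]
      simp only [accLoop, if_neg hc]
      have h1 := ih les (gts ++ [x]) p PRE SUF
      simpa [Nat.add_assoc, Nat.add_comm, Nat.add_left_comm] using h1

theorem take_append_len (l r : List Int) : (l ++ r).take l.length = l := by
  induction l with
  | nil => rfl
  | cons y l ih => simpa using ih

theorem drop_append_cons (l : List Int) (x : Int) (r : List Int) :
    (l ++ x :: r).drop (l.length + 1) = r := by
  induction l with
  | nil => rfl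
  | cons y l ih => simpa using ih

-- A's partition splits as L ++ pivot :: G with i = |L| + 1
theorem partitionA_split (p : Int) (t : List Int) :
    ∃ L G : List Int, partitionA (p :: t) = (L ++ p :: G, L.length + 1)
      ∧ L.length + G.length = t.length := by
  have hcorr := loop_corr t [] [] p
  have hsum := accLoop_len t p [] []
  rcases hP : accLoop p [] [] t with ⟨L, G⟩
  rw [hP] at hcorr hsum
  simp only [List.nil_append, List.length_nil, Nat.zero_add] at hcorr hsum
  simp only [partitionA, List.length_cons, Nat.add_sub_cancel, hcorr]
  rcases List.eq_nil_or_concat L with hL | ⟨L', z, hL⟩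
  · subst hL
    refine ⟨[], G, ?_, by simpa using hsum⟩
    simp only [List.length_nil, Nat.zero_add, Nat.sub_self, List.nil_append]
    rw [pvSwapA_id _ _ (by simp)]
  · subst hL
    refine ⟨z :: L', G, ?_, by simp at hsum ⊢; omega⟩
    have hsp := pvSwapA_split [] p L' z G
    simp only [List.nil_append, List.length_nil, Nat.zero_add] at hsp
    simp only [List.concat_eq_append, List.length_append, List.length_cons, List.length_nil,
      List.append_assoc, List.singleton_append, Nat.add_sub_cancel]
    rw [hsp]
    simp

-- B's range partition, in context, equals A's partition on the slice
theorem partRange_corr (PRE SUF t : List Int) (p : Int) :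
    partRange (PRE ++ (p :: t) ++ SUF) PRE.length (PRE.length + (t.length + 1))
      = (PRE ++ (partitionA (p :: t)).1 ++ SUF, PRE.length + (partitionA (p :: t)).2) := by
  have hpiv : (PRE ++ (p :: t) ++ SUF).getD PRE.length 0 = p := by
    have h0 := getD_append_length PRE p (t ++ SUF)
    simpa [List.append_assoc] using h0
  have hcorr := loop_corrI t [] [] p PRE SUF
  have hcorrA := loop_corr t [] [] p
  rcases hP : accLoop p [] [] t with ⟨L, G⟩
  rw [hP] at hcorr hcorrA
  simp only [List.nil_append, List.length_nil, Nat.zero_add, Nat.add_zero] at hcorr hcorrA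
  simp only [partRange, partitionA, hpiv, List.length_cons, Nat.add_sub_cancel,
    show PRE.length + (t.length + 1) - PRE.length - 1 = t.length by omega]
  rw [show PRE.length + 1 = PRE.length + 0 + 1 by omega] at hcorr
  simp only [Nat.add_zero] at hcorr
  simp only [List.append_assoc, List.cons_append]
  rw [hcorr, hcorrA]
  rcases List.eq_nil_or_concat L with hL | ⟨L', z, hL⟩
  · subst hL
    simp only [List.length_nil, Nat.zero_add, Nat.add_zero, Nat.add_sub_cancel, Nat.sub_self,
      List.nil_append]
    rw [pvSwapA_id _ _ (by simp), pvSwapA_id _ _ (by simp)]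
    simp
  · subst hL
    have hspA := pvSwapA_split [] p L' z G
    simp only [List.nil_append, List.length_nil, Nat.zero_add] at hspA
    have hspB := pvSwapA_split PRE p L' z (G ++ SUF)
    simp only [List.concat_eq_append, List.length_append, List.length_cons, List.length_nil,
      List.append_assoc, List.singleton_append, Nat.add_sub_cancel, Nat.zero_add]
    rw [hspA, hspB]
    simp
    omega

theorem qsA_length : ∀ (n : Nat) (a : List Int), a.length ≤ n →
    (qs_comps_pivot_a_0 a).1.length = a.length := by
  intro n
  induction n with
  | zero =>
    intro a h
    have ha : a = [] := List.eq_nil_of_length_eq_zero (Nat.le_zero.mp h)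
    subst ha; rw [qs_comps_pivot_a_0]; simp
  | succ n ih =>
    intro a hlen
    by_cases h1 : a.length ≤ 1
    · rw [qs_comps_pivot_a_0, if_pos h1]
    · rw [qs_comps_pivot_a_0, if_neg h1]
      obtain ⟨p, t, rfl⟩ : ∃ p t, a = p :: t := by
        cases a with
        | nil => simp at h1
        | cons p t => exact ⟨p, t, rfl⟩
      obtain ⟨L, G, hEq, hlenLG⟩ := partitionA_split p t
      simp only [List.length_cons] at hlen
      simp only [hEq, Nat.add_sub_cancel]
      rw [take_append_len L (p :: G), getD_append_length]
      have hd : (L ++ p :: G).drop (L.length + 1) = G := drop_append_cons L p G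
      rw [hd]
      simp [ih L (by omega), ih G (by omega)]
      omega

-- main induction: the stack loop processes a pushed range exactly as A's recursion
theorem stack_corr : ∀ (n : Nat) (xs : List Int), xs.length ≤ n →
    ∀ (PRE SUF : List Int) (c : Int) (s : List (Nat × Nat)),
    stackLoop (PRE ++ xs ++ SUF) c ((PRE.length, PRE.length + xs.length) :: s)
      = stackLoop (PRE ++ (qs_comps_pivot_a_0 xs).1 ++ SUF)
          (c + (qs_comps_pivot_a_0 xs).2) s := by
  intro n
  induction n with
  | zero =>
    intro xs h PRE SUF c s
    have hx : xs = [] := List.eq_nil_of_length_eq_zero (Nat.le_zero.mp h)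
    subst hx
    rw [qs_comps_pivot_a_0]
    simp [stackLoop]
  | succ n ih =>
    intro xs hlen PRE SUF c s
    by_cases h1 : xs.length ≤ 1
    · rw [qs_comps_pivot_a_0, if_pos h1]
      rw [stackLoop, if_pos (by omega)]
      simp
    · rw [qs_comps_pivot_a_0, if_neg h1]
      obtain ⟨p, t, rfl⟩ : ∃ p t, xs = p :: t := by
        cases xs with
        | nil => simp at h1
        | cons p t => exact ⟨p, t, rfl⟩
      simp only [List.length_cons] at hlen h1 ⊢
      rw [stackLoop, if_neg (by omega)]
      obtain ⟨L, G, hEq, hlenLG⟩ := partitionA_split p t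
      have hpr := partRange_corr PRE SUF t p
      rw [hEq] at hpr
      simp only [List.length_cons, hpr, Nat.add_sub_cancel, hEq]
      -- first recursive range: (|PRE|, |PRE| + |L|) over L
      have hL1 : PRE ++ (L ++ p :: G) ++ SUF = PRE ++ L ++ (p :: (G ++ SUF)) := by simp
      have hstep1 := ih L (by omega) PRE (p :: (G ++ SUF)) (c + ((PRE.length + (t.length + 1) : Nat) - (PRE.length : Nat) - 1)) ((PRE.length + (L.length + 1), PRE.length + (t.length + 1)) :: s)
      rw [hL1]
      rw [show PRE.length + (L.length + 1) - 1 = PRE.length + L.length by omega]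
      rw [hstep1]
      -- second recursive range over G
      have hqL := qsA_length L.length L le_rfl
      have hL2 : PRE ++ (qs_comps_pivot_a_0 L).1 ++ (p :: (G ++ SUF))
          = (PRE ++ (qs_comps_pivot_a_0 L).1 ++ [p]) ++ G ++ SUF := by simp
      have hlen2 : PRE.length + (L.length + 1)
          = (PRE ++ (qs_comps_pivot_a_0 L).1 ++ [p]).length := by simp [hqL]
      have hlen3 : PRE.length + (t.length + 1)
          = (PRE ++ (qs_comps_pivot_a_0 L).1 ++ [p]).length + G.length := by
        simp [hqL]; omega
      rw [hL2, hlen2, hlen3]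
      rw [ih G (by omega) _ SUF _ s]
      -- both sides: same list and same counter
      rw [take_append_len L (p :: G), getD_append_length]
      have hd : (L ++ p :: G).drop (L.length + 1) = G := drop_append_cons L p G
      rw [hd]
      congr 1
      · simp
      · simp only [List.length_append, List.length_cons, List.length_nil, hqL]
        push_cast
        omega

-- ===== VERDICT (by name: the statement is the Claim_ definition above) =====
theorem qs_comps_pivot_a_0_spec : Claim_equal_qs_comps_pivot_a_0 := by
  intro a _
  unfold Spec_qs_comps_pivot_a_0 qs_comps_pivot_a_0_alt
  have h := stack_corr a.length a le_rfl [] [] 0 []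
  simp only [List.nil_append, List.append_nil, List.length_nil, Nat.zero_add] at h
  rw [h, stackLoop]
  simp
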